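-- pv_equiv track=rewrite | github.com/saadchoukry/Tweet-s-Analyzer | results/views.py | getCountryCount
-- ===== SOURCE A (Python) =====
-- def getCountryCount(alpha3Countries):
--     countryCount = {}
--     total = 0
--     for alpha3Country in alpha3Countries:
--         total += 1
--         if alpha3Country in countryCount:
--             countryCount[alpha3Country]["numberOfThings"] += 1
--         else:
--             countryCount[alpha3Country] = {"fillKey": None, "numberOfThings": 1}
--     return countryCount, total
-- ===== SOURCE B (Python) =====
-- def getCountryCount(alpha3Countries):
--     srt = sorted(alpha3Countries)
--     counts = {}
--     i = 0
--     n = len(srt)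
--     while i < n:
--         j = i + 1
--         while j < n and srt[j] == srt[i]:
--             j += 1
--         counts[srt[i]] = j - i
--         i = j
--     countryCount = {c: {"fillKey": None, "numberOfThings": counts[c]}
--                     for c in dict.fromkeys(alpha3Countries)}
--     return countryCount, len(alpha3Countries)
-- ===== Notes on version B (the rewrite author's own statement) =====
-- stated objective: alternative
-- what changed: Replaces A's single hash-counting pass (in/not-in branch on record dicts plus running total) by sort-then-scan: sort the list, read off each run's length with a two-pointer scan to get the per-country counts, then emit the records in first-occurrence key order (dict.fromkeys); the total is just len(alpha3Countries).
import Mathlib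
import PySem

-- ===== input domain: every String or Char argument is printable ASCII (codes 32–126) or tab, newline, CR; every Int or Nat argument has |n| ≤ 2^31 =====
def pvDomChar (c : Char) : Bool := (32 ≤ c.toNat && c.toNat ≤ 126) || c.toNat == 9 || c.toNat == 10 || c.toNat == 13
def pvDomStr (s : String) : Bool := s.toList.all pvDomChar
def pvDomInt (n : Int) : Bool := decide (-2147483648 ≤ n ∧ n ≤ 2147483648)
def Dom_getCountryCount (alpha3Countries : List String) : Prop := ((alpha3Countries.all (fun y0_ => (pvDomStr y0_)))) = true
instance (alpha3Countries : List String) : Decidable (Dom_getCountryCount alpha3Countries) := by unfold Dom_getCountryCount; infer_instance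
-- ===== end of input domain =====

-- B replaces A's single hash-counting pass (in/not-in branch plus running total) by
-- sort-then-scan: sort the list, read off run lengths with a two-pointer scan, then emit the
-- records in first-occurrence key order; total = len(list). Objective: alternative algorithm.

-- ===== PORT A =====
-- A's loop body: dict of record-dicts plus running total; 'countryCount[k]["numberOfThings"] += 1'
-- is an in-place update of the inner dict = Dict.modify at the key ('+= 1' on the stored
-- optional int is Option.map (· + 1); A only ever stores ints there, so the None branch is unreachable).
def pvStepA (st : PySem.Dict String (PySem.Dict String (Option Int)) × Int) (k : String) :
    PySem.Dict String (PySem.Dict String (Option Int)) × Int :=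
  let total := st.2 + 1
  if st.1.contains k then
    (st.1.modify k PySem.Dict.empty
      (fun inner => inner.modify "numberOfThings" (some 0) (Option.map (· + 1))), total)
  else
    (st.1.insert k (PySem.Dict.ofList [("fillKey", none), ("numberOfThings", some 1)]), total)

def getCountryCount (alpha3Countries : List String) : (List (String × List (String × Option Int))) × Int :=
  let st := alpha3Countries.foldl pvStepA (PySem.Dict.empty, 0)
  (st.1.items.map (fun p => (p.1, p.2.items)), st.2)

-- ===== PORT B =====
-- B's outer while over the sorted list: at index i the inner 'while j < n and srt[j] == srt[i]'
-- measures the run of elements equal to srt[i] (= takeWhile on the tail), then counts[srt[i]] = j - i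
-- and i jumps to j (= dropWhile on the tail); ported as the same run recursion on the sorted list.
def pvRunScan (acc : PySem.Dict String Int) : List String → PySem.Dict String Int
  | [] => acc
  | c :: t =>
    let grp := t.takeWhile (fun x => x == c)
    let rest := t.dropWhile (fun x => x == c)
    pvRunScan (acc.insert c (1 + (grp.length : Int))) rest
termination_by s => s.length
decreasing_by
  exact Nat.lt_succ_of_le (List.Sublist.length_le (List.dropWhile_sublist _))

def getCountryCount_alt (alpha3Countries : List String) : (List (String × List (String × Option Int))) × Int :=
  let srt := PySem.List.sorted alpha3Countries (fun x => x) false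
  let counts := pvRunScan PySem.Dict.empty srt
  -- Python's counts[c] (KeyError if absent) is total here because every key of dict.fromkeys(xs)
  -- occurs in sorted(xs); ported with default 0 on that unreachable branch.
  -- dict.fromkeys(xs) iterates the first occurrences in order = PySem.Set.ofList xs.
  ((PySem.Set.ofList alpha3Countries).map
     (fun c => (c, [("fillKey", (none : Option Int)), ("numberOfThings", some (counts.getD c 0))])),
   (alpha3Countries.length : Int))

-- ===== PRECONDITION & SPEC =====
def Spec_getCountryCount (alpha3Countries : List String) (out : (List (String × List (String × Option Int))) × Int) : Prop := out = getCountryCount_alt alpha3Countries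
instance (alpha3Countries : List String) (out : (List (String × List (String × Option Int))) × Int) : Decidable (Spec_getCountryCount alpha3Countries out) := by unfold Spec_getCountryCount; infer_instance

-- ===== CLAIM (what is proved, stated in full; the proofs are below) =====
def Claim_equal_getCountryCount : Prop := ∀ (alpha3Countries : List String), Dom_getCountryCount alpha3Countries → Spec_getCountryCount alpha3Countries (getCountryCount alpha3Countries)

-- ===== LEMMAS AND PROOFS =====

-- the record dict A keeps per country, as a function of its count
def pvRec (n : Int) : PySem.Dict String (Option Int) :=
  PySem.Dict.ofList [("fillKey", none), ("numberOfThings", some n)]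

-- A's dict state, reconstructed from a counts dict
def pvToA (c : PySem.Dict String Int) : PySem.Dict String (PySem.Dict String (Option Int)) :=
  PySem.Dict.mk (c.items.map (fun p => (p.1, pvRec p.2)))

lemma pvRec_step (n : Int) :
    (pvRec n).modify "numberOfThings" (some 0) (Option.map (· + 1)) = pvRec (n + 1) := rfl

lemma pvToA_items (c : PySem.Dict String Int) :
    (pvToA c).items = c.items.map (fun p => (p.1, pvRec p.2)) := rfl

lemma pvToA_keys (c : PySem.Dict String Int) : (pvToA c).keys = c.keys := by
  simp [pvToA, PySem.Dict.keys]

lemma pvToA_contains (c : PySem.Dict String Int) (k : String) :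
    (pvToA c).contains k = c.contains k := by
  rw [PySem.Dict.contains_eq_decide_mem_keys, PySem.Dict.contains_eq_decide_mem_keys, pvToA_keys]

lemma pvToA_getD (c : PySem.Dict String Int) (hnd : c.keys.Nodup) (k : String)
    (h : c.contains k = true) :
    (pvToA c).getD k PySem.Dict.empty = pvRec (c.getD k 0) := by
  obtain ⟨n, hn⟩ : ∃ n, c.get? k = some n :=
    Option.isSome_iff_exists.mp (by rw [← PySem.Dict.contains_eq_isSome_get?, h])
  have hg : c.getD k 0 = n := PySem.Dict.getD_of_get?_eq_some c 0 hn
  have hmem : (k, n) ∈ c.items := PySem.Dict.mem_items_of_get?_eq_some c hn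
  have hmem' : (k, pvRec n) ∈ (pvToA c).items := by
    simp only [pvToA]
    exact List.mem_map.mpr ⟨(k, n), hmem, rfl⟩
  rw [hg]
  exact PySem.Dict.getD_of_mem_items (pvToA c) hmem' (by rw [pvToA_keys]; exact hnd) _

-- one step of A's loop, seen through pvToA, is one counting step
lemma pvStep (c : PySem.Dict String Int) (hnd : c.keys.Nodup) (k : String) (t : Int) :
    pvStepA (pvToA c, t) k = (pvToA (c.insert k (c.getD k 0 + 1)), t + 1) := by
  by_cases h : c.contains k = true
  · have hc : (pvToA c).contains k = true := by rw [pvToA_contains]; exact h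
    unfold pvStepA
    rw [if_pos hc]
    refine Prod.ext ?_ rfl
    have hmod : (pvToA c).modify k PySem.Dict.empty
        (fun inner => inner.modify "numberOfThings" (some 0) (Option.map (· + 1)))
        = (pvToA c).insert k (pvRec (c.getD k 0 + 1)) := by
      show (pvToA c).insert k _ = _
      rw [pvToA_getD c hnd k h]
      show (pvToA c).insert k
        ((pvRec (c.getD k 0)).modify "numberOfThings" (some 0) (Option.map (· + 1))) = _
      rw [pvRec_step]
    show ((pvToA c).modify k PySem.Dict.empty
        (fun inner => inner.modify "numberOfThings" (some 0) (Option.map (· + 1))))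
      = pvToA (c.insert k (c.getD k 0 + 1))
    rw [hmod]
    apply PySem.Dict.ext
    rw [PySem.Dict.items_insert_of_contains _ _ hc, pvToA_items, pvToA_items,
        PySem.Dict.items_insert_of_contains _ _ h]
    simp only [List.map_map]
    apply List.map_congr_left
    intro p _
    by_cases hpk : (p.1 == k) = true <;> simp [hpk, Function.comp]
  · have hf : c.contains k = false := by simpa using h
    have hc : (pvToA c).contains k = false := by rw [pvToA_contains]; exact hf
    have h0 : c.getD k 0 = 0 := PySem.Dict.getD_of_not_contains c 0 hf
    unfold pvStepA
    rw [if_neg (by simp [hc])]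
    refine Prod.ext ?_ rfl
    show (pvToA c).insert k (PySem.Dict.ofList [("fillKey", none), ("numberOfThings", some 1)])
      = pvToA (c.insert k (c.getD k 0 + 1))
    apply PySem.Dict.ext
    rw [PySem.Dict.items_insert_of_not_contains _ _ hc, pvToA_items, pvToA_items,
        PySem.Dict.items_insert_of_not_contains _ _ hf, h0]
    simp [pvRec]

-- A's whole loop, from a reconstructed state, is the counting loop plus the length
lemma pvLoop (xs : List String) (c : PySem.Dict String Int) (hnd : c.keys.Nodup) (t : Int) :
    xs.foldl pvStepA (pvToA c, t)
      = (pvToA (xs.foldl (fun (d : PySem.Dict String Int) x => d.insert x (d.getD x 0 + 1)) c),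
         t + xs.length) := by
  induction xs generalizing c t with
  | nil => simp
  | cons x xs ih =>
    rw [List.foldl_cons, pvStep c hnd x t, List.foldl_cons,
        ih _ (PySem.Dict.nodup_keys_insert _ _ _ hnd)]
    refine Prod.ext rfl ?_
    show t + 1 + (xs.length : Int) = t + ((x :: xs).length : Int)
    simp [List.length_cons]; ring

-- after dropping the leading run of c's from a tail whose elements all dominate c, c is gone
lemma pvNoMore (t : List String) (c : String) (hle : ∀ y ∈ t, c ≤ y)
    (h : t.Pairwise (· ≤ ·)) : c ∉ t.dropWhile (fun x => x == c) := by
  induction t with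
  | nil => simp
  | cons a t ih =>
    by_cases ha : (a == c) = true
    · rw [List.dropWhile_cons, if_pos ha]
      exact ih (fun y hy => hle y (List.mem_cons_of_mem _ hy)) (List.pairwise_cons.mp h).2
    · rw [List.dropWhile_cons, if_neg ha]
      have hne : a ≠ c := by simpa using ha
      have hac : c < a := lt_of_le_of_ne (hle a List.mem_cons_self) (fun h' => hne h'.symm)
      intro hmem
      rcases List.mem_cons.mp hmem with rfl | hmem
      · exact absurd rfl (ne_of_gt hac)
      · exact absurd (lt_of_lt_of_le hac ((List.pairwise_cons.mp h).1 c hmem)) (lt_irrefl c)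

-- the run scan over a sorted list produces each key's multiplicity (untouched keys keep acc's value)
lemma pvRunScan_getD (acc : PySem.Dict String Int) (s : List String) (k : String) :
    s.Pairwise (· ≤ ·) →
    (pvRunScan acc s).getD k 0 = if k ∈ s then (s.count k : Int) else acc.getD k 0 := by
  induction acc, s using pvRunScan.induct with
  | case1 acc => intro _; simp [pvRunScan]
  | case2 acc c t grp rest ih =>
    intro hs
    obtain ⟨hle, hpt⟩ := List.pairwise_cons.mp hs
    have hrest : (t.dropWhile (fun x => x == c)).Pairwise (· ≤ ·) :=
      List.Pairwise.sublist (List.dropWhile_sublist _) hpt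
    have hnoc : c ∉ t.dropWhile (fun x => x == c) := pvNoMore t c hle hpt
    have hgrp : ∀ x ∈ t.takeWhile (fun x => x == c), x = c := fun x hx => by
      simpa using List.mem_takeWhile_imp (l := t) (p := fun x => x == c) hx
    have hsplit : t = t.takeWhile (fun x => x == c) ++ t.dropWhile (fun x => x == c) :=
      (List.takeWhile_append_dropWhile ..).symm
    rw [pvRunScan]
    show (pvRunScan (acc.insert c (1 + ((t.takeWhile (fun x => x == c)).length : Int)))
        (t.dropWhile (fun x => x == c))).getD k 0 = _
    rw [ih hrest]
    by_cases hk : k = c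
    · subst hk
      rw [if_neg hnoc, PySem.Dict.getD_insert_self, if_pos List.mem_cons_self]
      have hcg : (t.takeWhile (fun x => x == k)).count k = (t.takeWhile (fun x => x == k)).length :=
        List.count_eq_length.mpr (fun b hb => (hgrp b hb).symm)
      have hcr : (t.dropWhile (fun x => x == k)).count k = 0 := List.count_eq_zero.mpr hnoc
      rw [List.count_cons_self, hsplit, List.count_append, hcg, hcr]
      push_cast; ring
    · have hkg : k ∉ t.takeWhile (fun x => x == c) := fun h => hk (hgrp k h)
      have hins : (acc.insert c (1 + ((t.takeWhile (fun x => x == c)).length : Int))).getD k 0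
          = acc.getD k 0 :=
        PySem.Dict.getD_insert_of_ne _ _ _ hk
      by_cases hr : k ∈ t.dropWhile (fun x => x == c)
      · have hmem : k ∈ c :: t :=
          List.mem_cons_of_mem _ (hsplit ▸ List.mem_append_right _ hr)
        rw [if_pos hr, if_pos hmem, List.count_cons_of_ne (Ne.symm hk), hsplit, List.count_append,
            List.count_eq_zero.mpr hkg]
        push_cast; ring
      · have hmem : k ∉ c :: t := by
          rw [hsplit]
          simp only [List.mem_cons, List.mem_append]
          push Not
          exact ⟨hk, hkg, hr⟩
        rw [if_neg hr, if_neg hmem, hins]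

-- ===== VERDICT (by name: the statement is the Claim_ definition above) =====
theorem getCountryCount_spec : Claim_equal_getCountryCount := by
  intro xs _
  show getCountryCount xs = getCountryCount_alt xs
  unfold getCountryCount getCountryCount_alt
  have h0 : (PySem.Dict.empty : PySem.Dict String (PySem.Dict String (Option Int))) = pvToA PySem.Dict.empty := rfl
  rw [h0, pvLoop xs PySem.Dict.empty PySem.Dict.nodup_keys_empty 0]
  have hc : xs.foldl (fun (d : PySem.Dict String Int) x => d.insert x (d.getD x 0 + 1)) PySem.Dict.empty
      = PySem.Dict.counter xs := PySem.Dict.foldl_insert_getD_add_one_eq_counter xs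
  rw [hc]
  refine Prod.ext ?_ ?_
  · show ((pvToA (PySem.Dict.counter xs)).items.map (fun p => (p.1, p.2.items)))
        = (PySem.Set.ofList xs).map (fun c =>
            (c, [("fillKey", (none : Option Int)),
                 ("numberOfThings", some ((pvRunScan PySem.Dict.empty
                     (PySem.List.sorted xs (fun x => x) false)).getD c 0))]))
    rw [pvToA_items, PySem.Dict.items_counter]
    simp only [List.map_map]
    apply List.map_congr_left
    intro k hk
    have hkx : k ∈ xs := (PySem.Set.mem_ofList ..).mp hk
    have hpair : (PySem.List.sorted xs (fun x => x) false).Pairwise (· ≤ ·) := by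
      simpa using PySem.List.sorted_pairwise xs (fun x => x)
    have hmem : k ∈ PySem.List.sorted xs (fun x => x) false :=
      (PySem.List.mem_sorted ..).mpr hkx
    have hcnt : (PySem.List.sorted xs (fun x => x) false).count k = xs.count k :=
      (PySem.List.sorted_perm xs (fun x => x) false).count_eq k
    rw [Function.comp, pvRunScan_getD _ _ _ hpair, if_pos hmem, hcnt]
    rfl
  · show (0 : Int) + xs.length = (xs.length : Int)
    ring
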